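-- pv_equiv track=rewrite | github.com/jose051002/Automata-tablero-ajedrez-5x5 | rutaRB.py | generar_movimientos
-- ===== SOURCE A (Python) =====
-- def generar_movimientos(tablero, secuencia, posicion_inicial=1):
--     movimientos = []
--
--     # Definir el color que corresponde a 'r' y 'b'
--     colores = {'r': 'rojo', 'b': 'negro'}
--
--     # Función recursiva para generar las combinaciones de movimientos
--     def explorar(posicion_actual, secuencia_restante, ruta):
--         if not secuencia_restante:  # Si la secuencia está vacía, guardar la ruta
--             movimientos.append(ruta)
--             return
--
--         color_deseado = secuencia_restante[0]  # Color que queremos respetar en este paso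
--         adyacentes = tablero[posicion_actual]  # Posiciones adyacentes de la actual
--
--         # Verifica si el color deseado está en el diccionario
--         if color_deseado not in adyacentes:
--             return  # Si el color no está, terminar la búsqueda
--
--         # Explorar cada posición adyacente
--         for adyacente in adyacentes[color_deseado]:
--             # Si el color coincide, explorar más desde esta posición
--             explorar(adyacente, secuencia_restante[1:], ruta + [adyacente])
--
--     # Iniciar la búsqueda desde la posición inicial
--     explorar(posicion_inicial, secuencia, [posicion_inicial])
--
--     return movimientos
-- ===== SOURCE B (Python) =====
-- def generar_movimientos(tablero, secuencia, posicion_inicial=1):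
--     # Iterative level-by-level expansion: no recursion, no shared accumulator.
--     rutas = [[posicion_inicial]]
--     for color in secuencia:
--         siguientes = []
--         for ruta in rutas:
--             adyacentes = tablero[ruta[-1]]
--             if color in adyacentes:
--                 for adyacente in adyacentes[color]:
--                     siguientes.append(ruta + [adyacente])
--         rutas = siguientes
--     return rutas
-- ===== Notes on version B (the rewrite author's own statement) =====
-- stated objective: simpler
-- what changed: Replaces A's recursive closure (nested 'explorar' mutating an outer accumulator, one call per partial path) with an iterative breadth-wise loop over the colour sequence that expands the whole list of partial paths one level at a time; no recursion, no shared mutable accumulator.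
import Mathlib
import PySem

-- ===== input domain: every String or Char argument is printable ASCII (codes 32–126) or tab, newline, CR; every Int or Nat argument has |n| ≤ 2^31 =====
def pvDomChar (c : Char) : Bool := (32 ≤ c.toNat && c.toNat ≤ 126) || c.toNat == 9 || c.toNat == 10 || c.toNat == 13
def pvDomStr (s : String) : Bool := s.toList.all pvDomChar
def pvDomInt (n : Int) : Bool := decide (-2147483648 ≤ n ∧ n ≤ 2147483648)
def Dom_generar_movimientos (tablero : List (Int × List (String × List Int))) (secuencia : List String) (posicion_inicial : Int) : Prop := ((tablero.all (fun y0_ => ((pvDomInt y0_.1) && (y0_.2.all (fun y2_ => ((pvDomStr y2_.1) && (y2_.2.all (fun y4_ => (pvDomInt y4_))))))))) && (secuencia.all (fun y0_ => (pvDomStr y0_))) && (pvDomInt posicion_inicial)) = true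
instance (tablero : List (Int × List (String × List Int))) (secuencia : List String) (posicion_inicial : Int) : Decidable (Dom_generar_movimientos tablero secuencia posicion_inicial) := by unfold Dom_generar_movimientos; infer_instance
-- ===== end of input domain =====

-- B replaces A's recursive closure with an iterative level-by-level expansion of partial paths (simpler: no recursion, no shared accumulator); return values agree on Pre_.

-- ===== PORT A =====
-- A's nested recursive 'explorar' with its 'for adyacente' loop; the loop is the
-- mutually recursive 'pvExplorarLoop'.  'tablero[pos]' / 'adyacentes[color]' are
-- first-match assoc-list lookups; the '.getD []' only makes the missing-key case
-- (Python KeyError, excluded by Pre_) total.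
mutual
def pvExplorar (tablero : List (Int × List (String × List Int))) : List String → Int → List Int → List (List Int) → List (List Int)
  | [], _, ruta, mov => mov ++ [ruta]
  | color :: rest, pos, ruta, mov =>
    let ady := (List.lookup pos tablero).getD []
    match List.lookup color ady with
    | none => mov
    | some vecinos => pvExplorarLoop tablero rest ruta vecinos mov
termination_by s _ _ _ => (2 * s.length + 1, 0)
decreasing_by all_goals simp_wf <;> omega

def pvExplorarLoop (tablero : List (Int × List (String × List Int))) (rest : List String) (ruta : List Int) : List Int → List (List Int) → List (List Int)
  | [], mov => mov
  | v :: vs, mov => pvExplorarLoop tablero rest ruta vs (pvExplorar tablero rest v (ruta ++ [v]) mov)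
termination_by vs _ => (2 * rest.length + 2, vs.length)
decreasing_by all_goals simp_wf <;> omega
end

def generar_movimientos (tablero : List (Int × List (String × List Int))) (secuencia : List String) (posicion_inicial : Int) : List (List Int) :=
  pvExplorar tablero secuencia posicion_inicial [posicion_inicial] []

-- ===== PORT B =====
-- one level of B's outer loop: expand every partial path by 'color'
def pvStepB (tablero : List (Int × List (String × List Int))) (rutas : List (List Int)) (color : String) : List (List Int) :=
  rutas.foldl (fun sig ruta =>
    let ady := (List.lookup (PySem.List.pyGetD ruta (-1) 0) tablero).getD []
    match List.lookup color ady with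
    | none => sig
    | some vs => sig ++ vs.map (fun v => ruta ++ [v])) []

def generar_movimientos_alt (tablero : List (Int × List (String × List Int))) (secuencia : List String) (posicion_inicial : Int) : List (List Int) :=
  secuencia.foldl (pvStepB tablero) [[posicion_inicial]]

-- ===== PRECONDITION & SPEC =====
-- frontier of positions reached after each colour step (used only to state Pre_)
def pvFrontierOk (tablero : List (Int × List (String × List Int))) : List String → List Int → Bool
  | [], _ => true
  | color :: rest, frontier =>
      frontier.all (fun p => (tablero.map (·.1)).contains p) &&
      pvFrontierOk tablero rest
        (frontier.flatMap (fun p => (List.lookup color ((List.lookup p tablero).getD [])).getD []))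

-- Pre_ excludes exactly the inputs on which the Python A raises KeyError: a position
-- reached while colours remain to be matched that is not a key of tablero.
def Pre_generar_movimientos (tablero : List (Int × List (String × List Int))) (secuencia : List String) (posicion_inicial : Int) : Prop :=
  pvFrontierOk tablero secuencia [posicion_inicial] = true
instance (tablero : List (Int × List (String × List Int))) (secuencia : List String) (posicion_inicial : Int) : Decidable (Pre_generar_movimientos tablero secuencia posicion_inicial) := by unfold Pre_generar_movimientos; infer_instance

def pvWitness_generar_movimientos : (List (Int × List (String × List Int))) × List String × Int :=
  ([(1, [("r", [2]), ("b", [1, 2])]), (2, [("b", [1])])], ["r", "b"], 1)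

def Spec_generar_movimientos (tablero : List (Int × List (String × List Int))) (secuencia : List String) (posicion_inicial : Int) (out : List (List Int)) : Prop := out = generar_movimientos_alt tablero secuencia posicion_inicial
instance (tablero : List (Int × List (String × List Int))) (secuencia : List String) (posicion_inicial : Int) (out : List (List Int)) : Decidable (Spec_generar_movimientos tablero secuencia posicion_inicial out) := by unfold Spec_generar_movimientos; infer_instance

-- ===== CLAIM (what is proved, stated in full; the proofs are below) =====
def Claim_equal_generar_movimientos : Prop := ∀ (tablero : List (Int × List (String × List Int))) (secuencia : List String) (posicion_inicial : Int), Dom_generar_movimientos tablero secuencia posicion_inicial → Pre_generar_movimientos tablero secuencia posicion_inicial → Spec_generar_movimientos tablero secuencia posicion_inicial (generar_movimientos tablero secuencia posicion_inicial)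

-- ===== LEMMAS AND PROOFS =====

-- what one path contributes at one level
def pvExpand (tablero : List (Int × List (String × List Int))) (color : String) (ruta : List Int) : List (List Int) :=
  match List.lookup color ((List.lookup (PySem.List.pyGetD ruta (-1) 0) tablero).getD []) with
  | none => []
  | some vs => vs.map (fun v => ruta ++ [v])

theorem pvStepB_eq_flatMap (t : List (Int × List (String × List Int))) (rutas : List (List Int)) (c : String) :
    pvStepB t rutas c = rutas.flatMap (pvExpand t c) := by
  unfold pvStepB
  have h : ∀ (rs : List (List Int)) (acc : List (List Int)),
      rs.foldl (fun sig ruta =>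
        match List.lookup c ((List.lookup (PySem.List.pyGetD ruta (-1) 0) t).getD []) with
        | none => sig
        | some vs => sig ++ vs.map (fun v => ruta ++ [v])) acc = acc ++ rs.flatMap (pvExpand t c) := by
    intro rs
    induction rs with
    | nil => simp
    | cons r rs ih =>
      intro acc
      simp only [List.foldl_cons, List.flatMap_cons, ih]
      unfold pvExpand
      cases List.lookup c ((List.lookup (PySem.List.pyGetD r (-1) 0) t).getD []) <;> simp
  simpa using h rutas []

theorem pvFold_append (t : List (Int × List (String × List Int))) (s : List String) (r1 r2 : List (List Int)) :
    s.foldl (pvStepB t) (r1 ++ r2) = s.foldl (pvStepB t) r1 ++ s.foldl (pvStepB t) r2 := by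
  induction s generalizing r1 r2 with
  | nil => simp
  | cons c s ih =>
    simp only [List.foldl_cons]
    rw [pvStepB_eq_flatMap, List.flatMap_append, ← pvStepB_eq_flatMap, ← pvStepB_eq_flatMap, ih]

theorem pvFold_nil (t : List (Int × List (String × List Int))) (s : List String) :
    s.foldl (pvStepB t) [] = [] := by
  induction s with
  | nil => rfl
  | cons c s ih => simpa [pvStepB_eq_flatMap] using ih

theorem pvExplorar_eq (t : List (Int × List (String × List Int))) (s : List String) :
    ∀ (pos : Int) (ruta : List Int) (mov : List (List Int)),
      PySem.List.pyGetD ruta (-1) 0 = pos →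
      pvExplorar t s pos ruta mov = mov ++ s.foldl (pvStepB t) [ruta] := by
  induction s with
  | nil => intro pos ruta mov _; simp [pvExplorar]
  | cons c rest ih =>
    intro pos ruta mov hlast
    rw [pvExplorar]
    simp only [List.foldl_cons]
    rw [pvStepB_eq_flatMap]
    simp only [List.flatMap_cons, List.flatMap_nil, List.append_nil]
    unfold pvExpand
    rw [hlast]
    cases hlk : List.lookup c ((List.lookup pos t).getD []) with
    | none => simp [pvFold_nil]
    | some vecinos =>
      simp only
      have hloop : ∀ (vs : List Int) (mov : List (List Int)),
          pvExplorarLoop t rest ruta vs mov = mov ++ rest.foldl (pvStepB t) (vs.map (fun v => ruta ++ [v])) := by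
        intro vs
        induction vs with
        | nil => intro mov; simp [pvExplorarLoop, pvFold_nil]
        | cons v vs ihv =>
          intro mov
          rw [pvExplorarLoop, ihv,
            ih v (ruta ++ [v]) mov (PySem.List.pyGetD_neg_one_append_singleton ruta v 0)]
          simp only [List.map_cons]
          rw [show (ruta ++ [v]) :: vs.map (fun w => ruta ++ [w]) = [ruta ++ [v]] ++ vs.map (fun w => ruta ++ [w]) from rfl,
            pvFold_append, List.append_assoc]
      exact hloop vecinos mov

-- ===== VERDICT (by name: the statement is the Claim_ definition above) =====
theorem generar_movimientos_spec : Claim_equal_generar_movimientos := by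
  intro t s p _ _
  unfold Spec_generar_movimientos generar_movimientos generar_movimientos_alt
  simpa using pvExplorar_eq t s p [p] [] (by simpa using PySem.List.pyGetD_neg_one_append_singleton [] p 0)
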